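-- pv_equiv track=rewrite | github.com/MightyMark3/Uni1_ROAR_Spring24 | competition_code/submission.py | get_lookahead_value
-- ===== SOURCE A (Python) =====
-- def get_lookahead_value(speed):
--     speed_to_lookahead_dict = {
--         70: 12,
--         90: 12,
--         110: 13,
--         130: 14,
--         160: 16,
--         180: 20,
--         200: 24,
--         300: 24
--     }
--     num_waypoints = 3
--     for speed_upper_bound, num_points in speed_to_lookahead_dict.items():
--         if speed < speed_upper_bound:
--           num_waypoints = num_points
--           break
--     return num_waypoints
-- ===== SOURCE B (Python) =====
-- _BOUNDS = [70, 90, 110, 130, 160, 180, 200, 300]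
-- _VALUES = [12, 12, 13, 14, 16, 20, 24, 24]
--
-- def _bisect_right(bounds, x):
--     lo, hi = 0, len(bounds)
--     while lo < hi:
--         mid = (lo + hi) // 2
--         if x < bounds[mid]:
--             hi = mid
--         else:
--             lo = mid + 1
--     return lo
--
-- def get_lookahead_value(speed):
--     idx = _bisect_right(_BOUNDS, speed)
--     return _VALUES[idx] if idx < len(_VALUES) else 3
-- ===== Notes on version B (the rewrite author's own statement) =====
-- stated objective: alternative
-- what changed: Replaced the linear first-match scan over the dict's (bound, value) pairs by a hand-written binary search (bisect_right) over a sorted bounds list paired with a parallel values table, keeping the original default for speeds at or beyond the top bound.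
import Mathlib
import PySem

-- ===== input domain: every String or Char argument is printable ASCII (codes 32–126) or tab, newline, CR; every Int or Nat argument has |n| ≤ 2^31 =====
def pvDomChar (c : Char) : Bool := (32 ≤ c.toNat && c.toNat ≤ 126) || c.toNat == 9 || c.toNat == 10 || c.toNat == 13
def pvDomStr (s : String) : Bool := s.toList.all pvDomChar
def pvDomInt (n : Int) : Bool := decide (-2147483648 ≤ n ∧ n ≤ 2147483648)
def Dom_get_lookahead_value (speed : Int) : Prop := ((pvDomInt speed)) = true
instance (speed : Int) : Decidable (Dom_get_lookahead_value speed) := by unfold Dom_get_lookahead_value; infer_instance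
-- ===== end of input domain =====

-- ===== PORT A =====
-- B differs from A: binary search over a sorted bounds list instead of a linear first-match scan.
-- Loop over the dict's (bound, value) items, breaking at the first bound with speed < bound.
def aScan (speed : Int) : List (Int × Int) → Int → Int
  | [], acc => acc
  | (b, n) :: rest, acc => if speed < b then n else aScan speed rest acc

def get_lookahead_value (speed : Int) : Int :=
  aScan speed [(70,12),(90,12),(110,13),(130,14),(160,16),(180,20),(200,24),(300,24)] 3

-- ===== PORT B =====
-- Transliteration of Source B's hand-written bisect_right while-loop; fuel = hi-lo bound
-- (the loop halves hi-lo each step, so bounds.length steps of fuel suffice; fuel never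
-- runs out on the paths actually taken).
def bGo (bounds : List Int) (x : Int) : Nat → Nat → Nat → Nat
  | 0, lo, _ => lo
  | fuel + 1, lo, hi =>
      if lo < hi then
        let mid := (lo + hi) / 2
        if x < bounds.getD mid 0 then bGo bounds x fuel lo mid
        else bGo bounds x fuel (mid + 1) hi
      else lo

def bisectRightB (bounds : List Int) (x : Int) : Nat :=
  bGo bounds x bounds.length 0 bounds.length

def bBounds : List Int := [70, 90, 110, 130, 160, 180, 200, 300]
def bValues : List Int := [12, 12, 13, 14, 16, 20, 24, 24]

def get_lookahead_value_alt (speed : Int) : Int :=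
  let idx := bisectRightB bBounds speed
  if idx < bValues.length then bValues.getD idx 0 else 3

-- ===== PRECONDITION & SPEC =====
def Spec_get_lookahead_value (speed : Int) (out : Int) : Prop := out = get_lookahead_value_alt speed
instance (speed : Int) (out : Int) : Decidable (Spec_get_lookahead_value speed out) := by unfold Spec_get_lookahead_value; infer_instance

-- ===== CLAIM (what is proved, stated in full; the proofs are below) =====
def Claim_equal_get_lookahead_value : Prop := ∀ (speed : Int), Dom_get_lookahead_value speed → Spec_get_lookahead_value speed (get_lookahead_value speed)

-- ===== LEMMAS AND PROOFS =====

-- ===== VERDICT (by name: the statement is the Claim_ definition above) =====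
theorem get_lookahead_value_spec : Claim_equal_get_lookahead_value := by
  intro speed _
  unfold Spec_get_lookahead_value get_lookahead_value get_lookahead_value_alt
  simp only [aScan, bisectRightB, bBounds, bValues]
  norm_num [show (8:Nat)=7+1 from rfl, show (7:Nat)=6+1 from rfl, show (6:Nat)=5+1 from rfl,
    show (5:Nat)=4+1 from rfl, show (4:Nat)=3+1 from rfl, bGo]
  split_ifs <;> simp_all <;> omega
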